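-- pv_equiv track=rewrite | github.com/junes7/python_algorithm | 프로그래머스/1/12917. 문자열 내림차순으로 배치하기/문자열 내림차순으로 배치하기.py | solution
-- ===== SOURCE A (Python) =====
-- def solution(s):
--     up,lo=[],[]
--     for c in s:
--         if c.isupper():
--             up+=[c]
--         else:
--             lo+=[c]
--     up=sorted(up,reverse=True)
--     lo=sorted(lo,reverse=True)
--     r=''.join(lo+up)
--     return r
-- ===== SOURCE B (Python) =====
-- def solution(s):
--     cnt = [0] * 128
--     for c in s:
--         cnt[ord(c)] += 1
--     parts = []
--     for code in reversed(range(128)):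
--         if not (65 <= code <= 90):
--             parts.append(chr(code) * cnt[code])
--     for code in reversed(range(65, 91)):
--         parts.append(chr(code) * cnt[code])
--     return ''.join(parts)
-- ===== Notes on version B (the rewrite author's own statement) =====
-- stated objective: faster
-- what changed: Replaced the two comparison sorts with a single counting pass over a 128-slot table, emitting characters by descending code (non-uppercase block first, then A-Z).
import Mathlib
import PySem

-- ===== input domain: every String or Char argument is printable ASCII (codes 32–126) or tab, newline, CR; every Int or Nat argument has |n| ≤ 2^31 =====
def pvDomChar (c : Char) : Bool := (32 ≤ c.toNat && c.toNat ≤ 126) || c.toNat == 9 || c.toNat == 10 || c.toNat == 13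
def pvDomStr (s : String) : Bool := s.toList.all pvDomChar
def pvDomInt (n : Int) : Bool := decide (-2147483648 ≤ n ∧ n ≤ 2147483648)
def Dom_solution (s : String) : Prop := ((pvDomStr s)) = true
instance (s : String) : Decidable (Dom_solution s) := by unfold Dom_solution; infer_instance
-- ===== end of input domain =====

-- B replaces A's two comparison sorts by a single counting pass over a 128-slot table,
-- emitting characters by descending code (non-uppercase block first, then Z..A): the timed objective is 'faster'.

-- ===== PORT A =====
def solution (s : String) : String :=
  let p := s.toList.foldl
    (fun (p : List Char × List Char) c =>
      if PySem.Chars.isupper c then (p.1 ++ [c], p.2) else (p.1, p.2 ++ [c]))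
    (([], []) : List Char × List Char)
  let up := PySem.List.sorted p.1 (fun c => c) true
  let lo := PySem.List.sorted p.2 (fun c => c) true
  String.ofList (lo ++ up)

-- ===== PORT B =====
def solution_alt (s : String) : String :=
  let cnt : List Nat := List.replicate 128 0
  let cnt := s.toList.foldl (fun cnt c => cnt.set c.toNat (cnt.getD c.toNat 0 + 1)) cnt
  let parts := (List.range 128).reverse.foldl
    (fun parts code =>
      if ¬ (65 ≤ code ∧ code ≤ 90) then
        parts ++ [String.ofList (List.replicate (cnt.getD code 0) (Char.ofNat code))]
      else parts)
    ([] : List String)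
  let parts := (List.range' 65 26).reverse.foldl
    (fun parts code =>
      parts ++ [String.ofList (List.replicate (cnt.getD code 0) (Char.ofNat code))])
    parts
  String.join parts

-- ===== PRECONDITION & SPEC =====
def Spec_solution (s : String) (out : String) : Prop := out = solution_alt s
instance (s : String) (out : String) : Decidable (Spec_solution s out) := by unfold Spec_solution; infer_instance

-- ===== CLAIM (what is proved, stated in full; the proofs are below) =====
def Claim_equal_solution : Prop := ∀ (s : String), Dom_solution s → Spec_solution s (solution s)

-- ===== LEMMAS AND PROOFS =====

theorem char_le_iff (a b : Char) : (a ≤ b) ↔ a.toNat ≤ b.toNat := by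
  rw [Char.le_def, UInt32.le_iff_toNat_le]; rfl

theorem toNat_ofNat_lt (n : Nat) (h : n < 128) : (Char.ofNat n).toNat = n := by
  have hv : n.isValidChar := Or.inl (by omega)
  simp [Char.ofNat, hv, Char.ofNatAux, Char.toNat]

theorem char_toNat_inj : Function.Injective Char.toNat := by
  intro a b h
  have := congrArg Char.ofNat h
  simpa [Char.ofNat_toNat] using this

theorem eq_ofNat_iff (c : Char) (n : Nat) (h : n < 128) : c = Char.ofNat n ↔ c.toNat = n := by
  constructor
  · intro hc; rw [hc, toNat_ofNat_lt n h]
  · intro hc; rw [← hc, Char.ofNat_toNat]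

theorem isupper_iff (c : Char) : PySem.Chars.isupper c = true ↔ (65 ≤ c.toNat ∧ c.toNat ≤ 90) := by
  have hA : ('A' : Char).toNat = 65 := by decide
  have hZ : ('Z' : Char).toNat = 90 := by decide
  simp [PySem.Chars.isupper, char_le_iff, hA, hZ]

theorem splitAB (xs : List Char) (acc : List Char × List Char) :
    xs.foldl
      (fun (p : List Char × List Char) c =>
        if PySem.Chars.isupper c then (p.1 ++ [c], p.2) else (p.1, p.2 ++ [c])) acc
    = (acc.1 ++ xs.filter PySem.Chars.isupper,
       acc.2 ++ xs.filter (fun c => !PySem.Chars.isupper c)) := by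
  induction xs generalizing acc with
  | nil => simp
  | cons c xs ih =>
    by_cases h : PySem.Chars.isupper c = true <;> simp [h, ih]

theorem cnt_spec (xs : List Char) (cnt : List Nat) (hlen : cnt.length = 128)
    (hxs : ∀ c ∈ xs, c.toNat < 128) (k : Nat) (hk : k < 128) :
    (xs.foldl (fun cnt c => cnt.set c.toNat (cnt.getD c.toNat 0 + 1)) cnt).getD k 0
      = cnt.getD k 0 + xs.countP (fun c => c.toNat == k) := by
  induction xs generalizing cnt with
  | nil => simp
  | cons c xs ih =>
    have hc : c.toNat < 128 := hxs c (by simp)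
    have hlen' : (cnt.set c.toNat (cnt.getD c.toNat 0 + 1)).length = 128 := by
      simp [hlen]
    rw [List.foldl_cons, ih _ hlen' (fun d hd => hxs d (by simp [hd]))]
    rw [List.countP_cons]
    by_cases h : c.toNat = k
    · subst h
      rw [List.getD_eq_getElem?_getD, List.getElem?_set_self (by omega),
          List.getD_eq_getElem?_getD]
      simp
      omega
    · rw [List.getD_eq_getElem?_getD, List.getElem?_set_ne h,
          ← List.getD_eq_getElem?_getD]
      simp [h]

theorem filter_toNat_eq_replicate (ys : List Char) (k : Nat) (hk : k < 128) :
    ys.filter (fun c => c.toNat == k)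
      = List.replicate (ys.countP (fun c => c.toNat == k)) (Char.ofNat k) := by
  rw [List.eq_replicate_iff]
  constructor
  · simp [List.countP_eq_length_filter]
  · intro b hb
    have := List.of_mem_filter hb
    exact (eq_ofNat_iff b k hk).mpr (by simpa using this)

theorem counting_perm (L : List Nat) (ys : List Char)
    (hnd : L.Nodup) (hsmall : ∀ k ∈ L, k < 128) (hys : ∀ c ∈ ys, c.toNat ∈ L) :
    ((L.map (fun k => List.replicate (ys.countP (fun c => c.toNat == k)) (Char.ofNat k))).flatten).Perm ys := by
  induction L generalizing ys with
  | nil =>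
    have : ys = [] := by
      cases ys with
      | nil => rfl
      | cons c t => exact absurd (hys c (by simp)) (by simp)
    simp [this]
  | cons k L' ih =>
    have hk : k < 128 := hsmall k (by simp)
    have hnd' : L'.Nodup := (List.nodup_cons.mp hnd).2
    have hkL' : k ∉ L' := (List.nodup_cons.mp hnd).1
    set p : Char → Bool := fun c => c.toNat == k with hp
    have hmapcongr :
        L'.map (fun k' => List.replicate (ys.countP (fun c => c.toNat == k')) (Char.ofNat k'))
          = L'.map (fun k' => List.replicate ((ys.filter (fun c => !p c)).countP (fun c => c.toNat == k')) (Char.ofNat k')) := by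
      apply List.map_congr_left
      intro k' hk'
      have hne : k' ≠ k := fun hcontra => hkL' (hcontra ▸ hk')
      congr 1
      rw [List.countP_filter]
      apply List.countP_congr
      intro c _
      simp only [hp, Bool.and_eq_true, Bool.not_eq_true', beq_iff_eq, beq_eq_false_iff_ne]
      constructor
      · intro hck'; exact ⟨hck', fun hck => hne (by omega)⟩
      · exact fun hand => hand.1
    have ihperm :
        ((L'.map (fun k' => List.replicate ((ys.filter (fun c => !p c)).countP (fun c => c.toNat == k')) (Char.ofNat k'))).flatten).Perm
          (ys.filter (fun c => !p c)) := by
      apply ih (ys.filter (fun c => !p c)) hnd'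
        (fun k' hk' => hsmall k' (List.mem_cons_of_mem _ hk'))
      intro c hc
      have hcy := List.mem_of_mem_filter hc
      have hcp : p c = false := by
        have := List.of_mem_filter hc
        simpa using this
      rcases List.mem_cons.mp (hys c hcy) with hcase | hcase
      · exfalso; rw [hp] at hcp; simp [hcase] at hcp
      · exact hcase
    simp only [List.map_cons, List.flatten_cons]
    rw [hmapcongr]
    have hfilter : List.replicate (ys.countP (fun c => c.toNat == k)) (Char.ofNat k) = ys.filter p :=
      (filter_toNat_eq_replicate ys k hk).symm
    rw [hfilter]
    exact (ihperm.append_left (ys.filter p)).trans (List.filter_append_perm p ys)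

theorem counting_eq_sorted (L : List Nat) (ys : List Char)
    (hL : L.Pairwise (· > ·)) (hsmall : ∀ k ∈ L, k < 128) (hys : ∀ c ∈ ys, c.toNat ∈ L) :
    (L.map (fun k => List.replicate (ys.countP (fun c => c.toNat == k)) (Char.ofNat k))).flatten
      = PySem.List.sorted ys (fun c => c) true := by
  apply PySem.List.eq_of_perm_of_pairwise_le_of_injective (fun c : Char => -(c.toNat : Int))
  · intro a b hab
    apply char_toNat_inj
    simp only [neg_inj, Int.natCast_inj] at hab
    exact hab
  · exact (counting_perm L ys hL.nodup hsmall hys).trans (PySem.List.sorted_perm ys (fun c => c) true).symm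
  · rw [List.pairwise_flatten]
    constructor
    · intro l hl
      rcases List.mem_map.mp hl with ⟨k, _, rfl⟩
      rw [List.pairwise_replicate]
      right; exact le_rfl
    · rw [List.pairwise_map]
      apply hL.imp_of_mem
      intro k1 k2 h1 h2 hgt x hx y hy
      have hx' := List.eq_of_mem_replicate hx
      have hy' := List.eq_of_mem_replicate hy
      subst hx'; subst hy'
      have e1 := toNat_ofNat_lt k1 (hsmall k1 h1)
      have e2 := toNat_ofNat_lt k2 (hsmall k2 h2)
      simp only [e1, e2, neg_le_neg_iff, Nat.cast_le]
      omega
  · have hpw := PySem.List.sorted_pairwise_rev ys (fun c : Char => c)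
    apply hpw.imp
    intro a b hba
    have hle := (char_le_iff b a).mp hba
    simp only [neg_le_neg_iff, Nat.cast_le]
    exact hle

theorem dom_chars (s : String) (h : Dom_solution s) : ∀ c ∈ s.toList, c.toNat < 128 := by
  intro c hc
  have := List.all_eq_true.mp h c hc
  simp [pvDomChar] at this
  omega

theorem join_ofList (bs : List (List Char)) (acc : String) :
    List.foldl (fun r s => r ++ s) acc (bs.map String.ofList) = acc ++ String.ofList bs.flatten := by
  induction bs generalizing acc with
  | nil => simp
  | cons b bs ih => simp [ih, String.toList_inj.symm]

-- the two descending code lists B iterates over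
def Ldown : List Nat := (List.range 128).reverse.filter (fun x => decide ¬ (65 ≤ x ∧ x ≤ 90))
def Lup : List Nat := (List.range' 65 26).reverse

theorem L1_pairwise : Ldown.Pairwise (· > ·) :=
  List.Pairwise.filter _ (List.pairwise_reverse.mpr List.pairwise_lt_range)

theorem L2_pairwise : Lup.Pairwise (· > ·) :=
  List.pairwise_reverse.mpr (List.pairwise_lt_range' ..)

theorem mem_L1 (k : Nat) : k ∈ Ldown ↔ (k < 128 ∧ ¬ (65 ≤ k ∧ k ≤ 90)) := by
  simp [Ldown, List.mem_filter, List.mem_reverse, List.mem_range]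
  omega

theorem mem_L2 (k : Nat) : k ∈ Lup ↔ (65 ≤ k ∧ k ≤ 90) := by
  simp [Lup, List.mem_reverse, List.mem_range'_1]
  omega

theorem alt_eq (s : String) (hchars : ∀ c ∈ s.toList, c.toNat < 128) :
    solution_alt s = String.ofList
      ((Ldown ++ Lup).map
        (fun k => List.replicate (s.toList.countP (fun c => c.toNat == k)) (Char.ofNat k))).flatten := by
  have hcnt : ∀ k, k < 128 →
      (s.toList.foldl (fun cnt c => cnt.set c.toNat (cnt.getD c.toNat 0 + 1)) (List.replicate 128 0)).getD k 0
        = s.toList.countP (fun c => c.toNat == k) := by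
    intro k hk
    rw [cnt_spec _ _ List.length_replicate hchars k hk,
        List.getD_eq_getElem?_getD, List.getElem?_replicate, if_pos hk]
    simp
  simp only [solution_alt]
  rw [PySem.List.foldl_append_ite (fun code => ¬ (65 ≤ code ∧ code ≤ 90)),
      PySem.List.foldl_append_singleton_eq_map]
  simp only [List.nil_append]
  rw [← List.map_append]
  rw [show ((List.range 128).reverse.filter fun x => decide ¬ (65 ≤ x ∧ x ≤ 90)) = Ldown from rfl]
  rw [show (List.range' 65 26).reverse = Lup from rfl]
  have hmap : (Ldown ++ Lup).map
      (fun code => String.ofList (List.replicate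
        ((s.toList.foldl (fun cnt c => cnt.set c.toNat (cnt.getD c.toNat 0 + 1)) (List.replicate 128 0)).getD code 0)
        (Char.ofNat code)))
    = ((Ldown ++ Lup).map
        (fun k => List.replicate (s.toList.countP (fun c => c.toNat == k)) (Char.ofNat k))).map String.ofList := by
    rw [List.map_map]
    apply List.map_congr_left
    intro k hk
    have hk128 : k < 128 := by
      rcases List.mem_append.mp hk with hcase | hcase
      · exact ((mem_L1 k).mp hcase).1
      · have := (mem_L2 k).mp hcase; omega
    simp only [hcnt k hk128, Function.comp_apply]
  rw [hmap]
  have hj := join_ofList ((Ldown ++ Lup).map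
      (fun k => List.replicate (s.toList.countP (fun c => c.toNat == k)) (Char.ofNat k))) ""
  exact hj.trans (String.toList_inj.mp (by simp))

theorem countP_lo (xs : List Char) (k : Nat) (hk : ¬ (65 ≤ k ∧ k ≤ 90)) :
    (xs.filter (fun c => !PySem.Chars.isupper c)).countP (fun c => c.toNat == k)
      = xs.countP (fun c => c.toNat == k) := by
  rw [List.countP_filter]
  apply List.countP_congr
  intro c _
  constructor
  · intro hcp
    have h1 : c.toNat = k := by simpa using (Bool.and_eq_true _ _).mp hcp |>.1
    simpa using h1
  · intro hcp
    have h1 : c.toNat = k := by simpa using hcp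
    have h2 : PySem.Chars.isupper c = false := by
      by_cases hcb : PySem.Chars.isupper c = true
      · exact absurd ((isupper_iff c).mp hcb) (by omega)
      · simpa using hcb
    simp [h1, h2]

theorem countP_up (xs : List Char) (k : Nat) (hk : 65 ≤ k ∧ k ≤ 90) :
    (xs.filter PySem.Chars.isupper).countP (fun c => c.toNat == k)
      = xs.countP (fun c => c.toNat == k) := by
  rw [List.countP_filter]
  apply List.countP_congr
  intro c _
  constructor
  · intro hcp
    have h1 : c.toNat = k := by simpa using (Bool.and_eq_true _ _).mp hcp |>.1
    simpa using h1
  · intro hcp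
    have h1 : c.toNat = k := by simpa using hcp
    have h2 : PySem.Chars.isupper c = true := (isupper_iff c).mpr (by omega)
    simp [h1, h2]

theorem final (s : String) (h : Dom_solution s) : solution s = solution_alt s := by
  have hchars := dom_chars s h
  have e1 : (Ldown.map (fun k => List.replicate (s.toList.countP (fun c => c.toNat == k)) (Char.ofNat k))).flatten
      = PySem.List.sorted (s.toList.filter (fun c => !PySem.Chars.isupper c)) (fun c => c) true := by
    have hswap : Ldown.map (fun k => List.replicate (s.toList.countP (fun c => c.toNat == k)) (Char.ofNat k))
        = Ldown.map (fun k => List.replicate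
            ((s.toList.filter (fun c => !PySem.Chars.isupper c)).countP (fun c => c.toNat == k)) (Char.ofNat k)) := by
      apply List.map_congr_left
      intro k hk
      simp only [countP_lo s.toList k ((mem_L1 k).mp hk).2]
    rw [hswap]
    apply counting_eq_sorted Ldown _ L1_pairwise (fun k hk => ((mem_L1 k).mp hk).1)
    intro c hc
    have hcl := List.mem_of_mem_filter hc
    have hcu : PySem.Chars.isupper c = false := by
      have := List.of_mem_filter hc; simpa using this
    rw [mem_L1]
    refine ⟨hchars c hcl, ?_⟩
    intro hcontra
    have hct : PySem.Chars.isupper c = true := (isupper_iff c).mpr hcontra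
    rw [hct] at hcu
    exact Bool.noConfusion hcu
  have e2 : (Lup.map (fun k => List.replicate (s.toList.countP (fun c => c.toNat == k)) (Char.ofNat k))).flatten
      = PySem.List.sorted (s.toList.filter PySem.Chars.isupper) (fun c => c) true := by
    have hswap : Lup.map (fun k => List.replicate (s.toList.countP (fun c => c.toNat == k)) (Char.ofNat k))
        = Lup.map (fun k => List.replicate
            ((s.toList.filter PySem.Chars.isupper).countP (fun c => c.toNat == k)) (Char.ofNat k)) := by
      apply List.map_congr_left
      intro k hk
      simp only [countP_up s.toList k ((mem_L2 k).mp hk)]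
    rw [hswap]
    apply counting_eq_sorted Lup _ L2_pairwise (fun k hk => by have := (mem_L2 k).mp hk; omega)
    intro c hc
    rw [mem_L2]
    exact (isupper_iff c).mp (List.of_mem_filter hc)
  rw [alt_eq s hchars]
  simp only [solution]
  rw [splitAB]
  simp only [List.nil_append]
  rw [List.map_append, List.flatten_append, e1, e2]

-- ===== VERDICT (by name: the statement is the Claim_ definition above) =====
theorem solution_spec : Claim_equal_solution := by
  intro s h
  unfold Spec_solution
  exact final s h
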